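-- pv_equiv track=rewrite | github.com/Nikitanoscov/encrypted_instructions | encrypted_instructions.py | decrypted_instructions
-- ===== SOURCE A (Python) =====
-- from typing import Union
--
-- def decrypted_instructions(instructions: str):
--     steps: list[Union[int, str]] = []
--     digit = 0
--     decrypted_str = ''
--     for elem in instructions:
--         if elem.isdigit():
--             digit = digit * 10 + int(elem)
--         elif elem == '[':
--             steps.append(decrypted_str)
--             steps.append(digit)
--             digit = 0
--             decrypted_str = ''
--         elif elem == ']':
--             number = steps.pop()
--             previous_string = steps.pop()
--             decrypted_str = previous_string + (decrypted_str * number)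
--         else:
--             decrypted_str += elem
--     return decrypted_str
-- ===== SOURCE B (Python) =====
-- def decrypted_instructions(instructions: str):
--     # Recursive-descent parser over a shared index; each call decodes until ']' or end and
--     # returns (decoded text, leftover number, stopping index).
--     def parse(i: int, num: int):
--         parts = []
--         while i < len(instructions):
--             c = instructions[i]
--             if c.isdigit():
--                 num = num * 10 + int(c)
--                 i += 1
--             elif c == '[':
--                 inner, num2, j = parse(i + 1, 0)
--                 parts.append(inner * num)
--                 num = num2
--                 i = j + 1
--             elif c == ']':
--                 break
--             else:
--                 parts.append(c)
--                 i += 1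
--         return ''.join(parts), num, i
--     return parse(0, 0)[0]
-- ===== Notes on version B (the rewrite author's own statement) =====
-- stated objective: alternative
-- what changed: Replaced A's explicit stack of (previous_string, digit) frames with a recursive-descent parser that threads a shared index and returns (text, leftover number, next position) from each bracketed group.
-- outside the precondition, e.g. on decrypted_instructions('a2[b'): A returns 'b', B returns 'abb'; on decrypted_instructions('['): A returns '', B returns ''; on decrypted_instructions('ab]c'): A raises IndexError, B returns 'ab'
import Mathlib
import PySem

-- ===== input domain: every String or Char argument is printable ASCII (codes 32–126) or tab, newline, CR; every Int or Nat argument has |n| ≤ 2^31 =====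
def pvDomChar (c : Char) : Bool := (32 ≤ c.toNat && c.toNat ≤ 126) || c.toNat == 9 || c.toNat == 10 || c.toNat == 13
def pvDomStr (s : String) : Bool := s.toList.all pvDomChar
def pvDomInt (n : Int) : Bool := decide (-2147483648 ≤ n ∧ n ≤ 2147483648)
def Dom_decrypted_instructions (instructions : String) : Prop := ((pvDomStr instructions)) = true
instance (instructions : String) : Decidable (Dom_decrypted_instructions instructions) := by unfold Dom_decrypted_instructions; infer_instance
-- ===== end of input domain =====

-- B replaces A's explicit stack of (string, digit) frames by a recursive-descent parser
-- threading a shared position (objective: alternative decomposition, same cost).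

-- ===== PORT A =====
-- int(elem) for a single digit character
def digitVal (c : Char) : Int := (c.toNat : Int) - 48

-- A's loop state: `steps` holds the pairs (previous_string, digit) that Python pushes as two
-- consecutive stack entries (popped together again, so paired here); strings are List Char.
def aLoop : List Char → List (List Char × Int) → Int → List Char → List Char
  | [], _, _, dec => dec
  | c :: rest, steps, digit, dec =>
    if c.isDigit then aLoop rest steps (digit * 10 + digitVal c) dec
    else if c = '[' then aLoop rest ((dec, digit) :: steps) 0 []
    else if c = ']' then
      match steps with
      | [] => dec  -- Python raises IndexError here; excluded by Pre_
      | (prev, n) :: st => aLoop rest st digit (prev ++ PySem.List.pyRepeat dec n)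
    else aLoop rest steps digit (dec ++ [c])

def decrypted_instructions (instructions : String) : String :=
  String.ofList (aLoop instructions.toList [] 0 [])

-- ===== PORT B =====
-- Recursive descent: parse chars until ']' or end; returns (text, leftover number, remaining
-- input starting at the stopping ']').  Source B's shared index i becomes the remaining suffix;
-- `i = j + 1` after the recursive call becomes `drop 1`; Source B's parts.append/''.join
-- accumulation is the flat char-list `out`, appending the same chunks in the same order.
-- Fuel = input length + 1 (each call in a chain consumes ≥ 1 character, so never exhausted).
def bParse : Nat → List Char → Int → List Char → List Char × Int × List Char
  | 0, cs, num, out => (out, num, cs)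
  | _ + 1, [], num, out => (out, num, [])
  | f + 1, c :: rest, num, out =>
    if c.isDigit then bParse f rest (num * 10 + digitVal c) out
    else if c = '[' then
      match bParse f rest 0 [] with
      | (inner, num2, rest2) => bParse f (rest2.drop 1) num2 (out ++ PySem.List.pyRepeat inner num)
    else if c = ']' then (out, num, c :: rest)
    else bParse f rest num (out ++ [c])

def decrypted_instructions_alt (instructions : String) : String :=
  String.ofList ((bParse (instructions.toList.length + 1) instructions.toList 0 []).1)

-- ===== PRECONDITION & SPEC =====
-- Pre_ restricts to the function's natural domain, balanced bracket encodings: on a stray ']'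
-- Python A raises IndexError (pop from an empty list), and on an unmatched '[' the encoding is
-- truncated mid-group, a malformed corner no specification covers — A returns the still-open
-- innermost fragment, B the text it could decode, and either value is as defensible as the
-- other; both kinds of unbalanced input are excluded.
def Pre_decrypted_instructions (instructions : String) : Prop :=
  (∀ i < instructions.toList.length + 1,
      (instructions.toList.take i).count ']' ≤ (instructions.toList.take i).count '[') ∧
  instructions.toList.count '[' = instructions.toList.count ']'
instance (instructions : String) : Decidable (Pre_decrypted_instructions instructions) := by
  unfold Pre_decrypted_instructions; infer_instance

def pvWitness_decrypted_instructions : String := "ab2[x10[yz]]c"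

def Spec_decrypted_instructions (instructions : String) (out : String) : Prop :=
  out = decrypted_instructions_alt instructions
instance (instructions : String) (out : String) : Decidable (Spec_decrypted_instructions instructions out) := by
  unfold Spec_decrypted_instructions; infer_instance

-- ===== CLAIM (what is proved, stated in full; the proofs are below) =====
def Claim_equal_decrypted_instructions : Prop := ∀ (instructions : String), Dom_decrypted_instructions instructions → Pre_decrypted_instructions instructions → Spec_decrypted_instructions instructions (decrypted_instructions instructions)

-- ===== LEMMAS AND PROOFS =====

-- canonical-fuel application of bParse
def BPo (cs : List Char) (num : Int) (out : List Char) : List Char × Int × List Char :=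
  bParse (cs.length + 1) cs num out

-- the remaining input never grows
lemma bParse_rest_len : ∀ (f : Nat) (cs : List Char) (num : Int) (out : List Char),
    ((bParse f cs num out).2.2).length ≤ cs.length := by
  intro f
  induction f with
  | zero => intro cs num out; simp [bParse]
  | succ f ih =>
    intro cs num out
    cases cs with
    | nil => simp [bParse]
    | cons c rest =>
      simp only [bParse]
      split_ifs with h1 h2 h3
      · exact le_trans (ih rest _ out) (by simp)
      · rcases hp : bParse f rest 0 [] with ⟨inner, num2, rest2⟩
        dsimp only
        have h4 : rest2.length ≤ rest.length := by
          have := ih rest 0 []; rw [hp] at this; simpa using this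
        have h5 := ih (rest2.drop 1) num2 (out ++ PySem.List.pyRepeat inner num)
        simp only [List.length_drop] at h5
        simp only [List.length_cons]
        omega
      · simp
      · exact le_trans (ih rest _ _) (by simp)

-- fuel irrelevance: any adequate fuel computes BPo
lemma bParse_fuel : ∀ (n : Nat) (cs : List Char) (f : Nat) (num : Int) (out : List Char),
    cs.length ≤ n → cs.length < f → bParse f cs num out = BPo cs num out := by
  intro n
  induction n with
  | zero =>
    intro cs f num out h1 hf
    have : cs = [] := List.eq_nil_of_length_eq_zero (by omega)
    subst this
    obtain ⟨f', rfl⟩ : ∃ f', f = f' + 1 := ⟨f - 1, by omega⟩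
    simp [bParse, BPo]
  | succ n ih =>
    intro cs f num out h1 hf
    cases cs with
    | nil =>
      obtain ⟨f', rfl⟩ : ∃ f', f = f' + 1 := ⟨f - 1, by omega⟩
      simp [bParse, BPo]
    | cons c rest =>
      simp only [List.length_cons] at h1 hf
      obtain ⟨f', rfl⟩ : ∃ f', f = f' + 1 := ⟨f - 1, by omega⟩
      simp only [bParse, BPo, List.length_cons]
      split_ifs with h2 h3 h4
      · rw [ih rest f' _ out (by omega) (by omega), ih rest (rest.length + 1) _ out (by omega) (by omega)]
      · rw [ih rest f' 0 [] (by omega) (by omega), ih rest (rest.length + 1) 0 [] (by omega) (by omega)]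
        rcases hp : BPo rest 0 [] with ⟨inner, num2, rest2⟩
        dsimp only
        have hr2 : rest2.length ≤ rest.length := by
          have := bParse_rest_len (rest.length + 1) rest 0 []
          rw [show bParse (rest.length + 1) rest 0 [] = BPo rest 0 [] from rfl, hp] at this
          simpa using this
        rw [ih (rest2.drop 1) f' num2 _ (by simp; omega) (by simp; omega),
            ih (rest2.drop 1) (rest.length + 1) num2 _ (by simp; omega) (by simp; omega)]
      · rfl
      · rw [ih rest f' _ _ (by omega) (by omega), ih rest (rest.length + 1) _ _ (by omega) (by omega)]

-- balanced bracket strings, structurally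
inductive Bal : List Char → Prop
  | nil : Bal []
  | chr {c : Char} {r : List Char} : c ≠ '[' → c ≠ ']' → Bal r → Bal (c :: r)
  | brk {inner r : List Char} : Bal inner → Bal r → Bal ('[' :: inner ++ ']' :: r)

-- BPo one-step unfoldings
lemma BPo_nil (num : Int) (out : List Char) : BPo [] num out = (out, num, []) := rfl

lemma BPo_digit {c : Char} (h : c.isDigit = true) (r : List Char) (num : Int) (out : List Char) :
    BPo (c :: r) num out = BPo r (num * 10 + digitVal c) out := by
  simp [BPo, bParse, h]

lemma BPo_close (r : List Char) (num : Int) (out : List Char) :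
    BPo (']' :: r) num out = (out, num, ']' :: r) := by
  simp [BPo, bParse]

lemma BPo_other {c : Char} (h1 : c.isDigit = false) (h2 : c ≠ '[') (h3 : c ≠ ']')
    (r : List Char) (num : Int) (out : List Char) :
    BPo (c :: r) num out = BPo r num (out ++ [c]) := by
  simp [BPo, bParse, h1, h2, h3]

lemma BPo_rest_len (cs : List Char) (num : Int) (out : List Char) :
    ((BPo cs num out).2.2).length ≤ cs.length :=
  bParse_rest_len (cs.length + 1) cs num out

lemma BPo_open (r : List Char) (num : Int) (out : List Char) :
    BPo ('[' :: r) num out =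
      BPo ((BPo r 0 []).2.2.drop 1) (BPo r 0 []).2.1 (out ++ PySem.List.pyRepeat (BPo r 0 []).1 num) := by
  rcases hp : BPo r 0 [] with ⟨inner, num2, rest2⟩
  have hr2 : rest2.length ≤ r.length := by
    have := BPo_rest_len r 0 []
    rw [hp] at this; simpa using this
  show bParse (('[' :: r).length + 1) ('[' :: r) num out = _
  simp only [List.length_cons, bParse, show ('[' : Char).isDigit = false from rfl,
    Bool.false_eq_true, if_false]
  rw [show bParse (r.length + 1) r 0 [] = BPo r 0 [] from rfl, hp]
  dsimp only
  rw [bParse_fuel (rest2.drop 1).length (rest2.drop 1) (r.length + 1) num2 _ le_rfl (by simp; omega)]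
  simp

-- composition of B's parser over a balanced prefix
lemma compB {cs : List Char} (h : Bal cs) : ∀ (suffix : List Char) (num : Int) (out : List Char),
    BPo (cs ++ suffix) num out = BPo suffix (BPo cs num out).2.1 (BPo cs num out).1 := by
  induction h with
  | nil => intro suffix num out; simp [BPo_nil]
  | @chr c r h1 h2 hr ihr =>
    intro suffix num out
    by_cases hd : c.isDigit
    · rw [List.cons_append, BPo_digit hd, BPo_digit hd, ihr]
    · have hd' : c.isDigit = false := by simpa using hd
      rw [List.cons_append, BPo_other hd' h1 h2, BPo_other hd' h1 h2, ihr]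
  | @brk inner r hI hR ihI ihR =>
    intro suffix num out
    have step : ∀ (t : List Char) (num : Int) (out : List Char),
        BPo ('[' :: inner ++ ']' :: t) num out =
          BPo t (BPo inner 0 []).2.1 (out ++ PySem.List.pyRepeat (BPo inner 0 []).1 num) := by
      intro t num out
      rw [show ('[' :: inner ++ ']' :: t) = '[' :: (inner ++ ']' :: t) from rfl, BPo_open,
          ihI (']' :: t) 0 [], BPo_close]
      simp
    rw [show ('[' :: inner ++ ']' :: r) ++ suffix = '[' :: inner ++ ']' :: (r ++ suffix) by simp,
        step, step, ihR]

-- B's parse of a bracketed group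
lemma BPo_brk {inner : List Char} (hI : Bal inner) (r : List Char) (num : Int) (out : List Char) :
    BPo ('[' :: inner ++ ']' :: r) num out =
      BPo r (BPo inner 0 []).2.1 (out ++ PySem.List.pyRepeat (BPo inner 0 []).1 num) := by
  rw [show ('[' :: inner ++ ']' :: r) = '[' :: (inner ++ ']' :: r) from rfl, BPo_open,
      compB hI (']' :: r) 0 [], BPo_close]
  simp

-- aLoop one-step unfoldings
lemma aLoop_digit {c : Char} (h : c.isDigit = true) (r : List Char)
    (steps : List (List Char × Int)) (num : Int) (acc : List Char) :
    aLoop (c :: r) steps num acc = aLoop r steps (num * 10 + digitVal c) acc := by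
  simp [aLoop, h]

lemma aLoop_open (r : List Char) (steps : List (List Char × Int)) (num : Int) (acc : List Char) :
    aLoop ('[' :: r) steps num acc = aLoop r ((acc, num) :: steps) 0 [] := by
  simp [aLoop]

lemma aLoop_close (r : List Char) (prev : List Char) (n : Int)
    (st : List (List Char × Int)) (num : Int) (acc : List Char) :
    aLoop (']' :: r) ((prev, n) :: st) num acc = aLoop r st num (prev ++ PySem.List.pyRepeat acc n) := by
  simp [aLoop]

lemma aLoop_other {c : Char} (h1 : c.isDigit = false) (h2 : c ≠ '[') (h3 : c ≠ ']')
    (r : List Char) (steps : List (List Char × Int)) (num : Int) (acc : List Char) :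
    aLoop (c :: r) steps num acc = aLoop r steps num (acc ++ [c]) := by
  simp [aLoop, h1, h2, h3]

-- A's loop over a balanced prefix computes exactly B's parse of that prefix
lemma aLoop_comp {cs : List Char} (h : Bal cs) :
    ∀ (tail : List Char) (steps : List (List Char × Int)) (num : Int) (acc : List Char),
    aLoop (cs ++ tail) steps num acc = aLoop tail steps (BPo cs num acc).2.1 (BPo cs num acc).1 := by
  induction h with
  | nil => intro tail steps num acc; simp [BPo_nil]
  | @chr c r h1 h2 hr ihr =>
    intro tail steps num acc
    by_cases hd : c.isDigit
    · rw [List.cons_append, aLoop_digit hd, ihr, BPo_digit hd]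
    · have hd' : c.isDigit = false := by simpa using hd
      rw [List.cons_append, aLoop_other hd' h1 h2, ihr, BPo_other hd' h1 h2]
  | @brk inner r hI hR ihI ihR =>
    intro tail steps num acc
    rw [show ('[' :: inner ++ ']' :: r) ++ tail = '[' :: (inner ++ ']' :: (r ++ tail)) by simp,
        aLoop_open, ihI (']' :: (r ++ tail)) ((acc, num) :: steps) 0 [], aLoop_close, ihR,
        BPo_brk hI]

-- a string whose prefixes never close more than they open, with equal totals, is balanced
lemma bal_of_counts : ∀ (n : Nat) (l : List Char), l.length ≤ n →
    (∀ i ≤ l.length, (l.take i).count ']' ≤ (l.take i).count '[') →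
    l.count '[' = l.count ']' → Bal l := by
  intro n
  induction n with
  | zero =>
    intro l h1 _ _
    have : l = [] := List.eq_nil_of_length_eq_zero (by omega)
    subst this; exact Bal.nil
  | succ n ih =>
    intro l h1 hpre heq
    cases l with
    | nil => exact Bal.nil
    | cons c r =>
      simp only [List.length_cons] at h1
      by_cases hc1 : c = ']'
      · exfalso
        have h2 := hpre 1 (by simp)
        subst hc1
        simp at h2
      by_cases hc0 : c = '['
      · subst hc0
        have hcr : r.count ']' = r.count '[' + 1 := by
          simp at heq; omega
        have hrlen : 1 ≤ r.length := by
          by_contra hcon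
          have : r = [] := List.eq_nil_of_length_eq_zero (by omega)
          subst this; simp at hcr
        have hPlast : (r.take (r.length - 1 + 1)).count '[' < (r.take (r.length - 1 + 1)).count ']' := by
          rw [show r.length - 1 + 1 = r.length by omega, List.take_length]
          omega
        have hex : ∃ j, (r.take (j + 1)).count '[' < (r.take (j + 1)).count ']' :=
          ⟨r.length - 1, hPlast⟩
        have hPj : (r.take (Nat.find hex + 1)).count '[' < (r.take (Nat.find hex + 1)).count ']' :=
          Nat.find_spec hex
        have hjle : Nat.find hex ≤ r.length - 1 := Nat.find_le hPlast
        set j := Nat.find hex with hjdef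
        have hjlt : j < r.length := by omega
        have hpr : ∀ i ≤ j, (r.take i).count ']' ≤ (r.take i).count '[' := by
          intro i hi
          cases i with
          | zero => simp
          | succ i' =>
            have hm := Nat.find_min hex (m := i') (by omega)
            omega
        have htq : r.take (j + 1) = r.take j ++ [r[j]] := by
          rw [List.take_add_one, List.getElem?_eq_getElem hjlt]
          rfl
        have hcj : r[j] = ']' := by
          by_contra hne
          have h1' := hpr j le_rfl
          rw [htq] at hPj
          simp only [List.count_append, List.count_singleton'] at hPj
          rw [if_neg hne] at hPj
          split_ifs at hPj <;> omega
        have hAeq : (r.take j).count ']' = (r.take j).count '[' := by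
          have h1' := hpr j le_rfl
          rw [htq, hcj] at hPj
          simp only [List.count_append, List.count_singleton'] at hPj
          simp at hPj
          omega
        have hdec : r = r.take j ++ ']' :: r.drop (j + 1) := by
          conv_lhs => rw [← List.take_append_drop j r]
          rw [List.drop_eq_getElem_cons hjlt, hcj]
        have hAlen : (r.take j).length = j := by simp [hjlt.le]
        have hcountr : ∀ x : Char, r.count x = (r.take j).count x + (']' :: r.drop (j + 1)).count x := by
          intro x
          conv_lhs => rw [hdec]
          rw [List.count_append]
        have hbalA : Bal (r.take j) := by
          apply ih (r.take j) (by omega)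
          · intro i hi
            rw [hAlen] at hi
            rw [List.take_take, min_eq_left hi]
            exact hpr i hi
          · exact hAeq.symm
        have hbalB : Bal (r.drop (j + 1)) := by
          apply ih (r.drop (j + 1)) (by simp; omega)
          · intro i hi
            simp only [List.length_drop] at hi
            have hp2 := hpre (j + 2 + i) (by simp; omega)
            have htk : (('[' :: r).take (j + 2 + i)) = '[' :: (r.take j ++ ']' :: (r.drop (j + 1)).take i) := by
              rw [show j + 2 + i = (j + 1 + i) + 1 by omega, List.take_succ_cons]
              congr 1
              conv_lhs => rw [hdec]
              rw [List.take_append, List.take_of_length_le (by omega), hAlen,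
                  show j + 1 + i - j = 1 + i by omega, show 1 + i = i + 1 by omega,
                  List.take_succ_cons]
            rw [htk] at hp2
            simp only [List.count_cons, List.count_append] at hp2 ⊢
            simp at hp2 ⊢
            omega
          · have e1 := hcountr '['
            have e2 := hcountr ']'
            simp only [List.count_cons] at e1 e2
            simp at e1 e2
            omega
        have : Bal ('[' :: r.take j ++ ']' :: r.drop (j + 1)) := Bal.brk hbalA hbalB
        rw [List.cons_append, ← hdec] at this
        exact this
      · refine Bal.chr hc0 hc1 (ih r (by omega) ?_ ?_)
        · intro i hi
          have hp2 := hpre (i + 1) (by simp; omega)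
          rw [List.take_succ_cons] at hp2
          simp only [List.count_cons] at hp2
          simp [hc0, hc1] at hp2
          omega
        · simp only [List.count_cons] at heq
          simp [hc0, hc1] at heq
          exact heq

-- ===== VERDICT (by name: the statement is the Claim_ definition above) =====
theorem decrypted_instructions_spec : Claim_equal_decrypted_instructions := by
  intro s _ hpre
  obtain ⟨h1, h2⟩ := hpre
  have hbal : Bal s.toList :=
    bal_of_counts s.toList.length s.toList le_rfl (fun i hi => h1 i (by omega)) h2
  show decrypted_instructions s = decrypted_instructions_alt s
  unfold decrypted_instructions decrypted_instructions_alt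
  have := aLoop_comp hbal [] [] 0 []
  simp only [List.append_nil] at this
  rw [this]
  rfl
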